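-- pv_equiv track=rewrite | github.com/BOLTB0X/PS | Programmers/KAKAO/괄호 변환.py | recur_func
-- ===== SOURCE A (Python) =====
-- def separe_p(p):
--     left, right = 0,0
--
--     # 균형잡힌 괄호인지 체크
--     for i in range(len(p)):
--         if p[i] == '(':
--             left += 1
--         elif p[i] == ')':
--             right += 1
--
--         if left == right:
--             u = p[:i + 1]
--             v = p[i + 1:]
--             break;
--     return u, v
--
-- def is_collect(p):
--     stack = []
--     for pp in p:
--         if pp == '(':
--             stack.append(pp)
--         elif pp == ')':
--             if not len(stack):
--                 return False
--             else:
--                 stack.pop()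
--     if len(stack):
--         return False
--     return True
--
-- def recur_func(p):
--     result = ""
--     tmp = ""
--
--     # 1
--     if not len(p):
--         return p
--
--     # 2
--     u, v = separe_p(p)
--
--     # 3
--     if is_collect(u):
--         result = u + recur_func(v)# 3-1
--     # 4
--     else:
--         result += "(" # 4-1
--         result += recur_func(v) # 4-2
--         result += ")" # 4-3
--
--         u = u[1:-1] # 4-4
--         for uu in u:
--             if uu == '(':
--                 result += ')'
--             else:
--                 result += '('
--
--      # 4-5
--     return result
-- ===== SOURCE B (Python) =====
-- def recur_func(p):
--     pre = []
--     post = []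
--     i = 0
--     n = len(p)
--     while i < n:
--         j = i
--         bal = 0
--         ok = True
--         while True:
--             c = p[j]
--             if c == '(':
--                 bal += 1
--             elif c == ')':
--                 bal -= 1
--             if bal < 0:
--                 ok = False
--             j += 1
--             if bal == 0:
--                 break
--         seg = p[i:j]
--         if ok:
--             pre.append(seg)
--         else:
--             pre.append('(')
--             post.append(')' + ''.join(')' if c == '(' else '(' for c in seg[1:-1]))
--         i = j
--     return ''.join(pre) + ''.join(reversed(post))
-- ===== Notes on version B (the rewrite author's own statement) =====
-- stated objective: faster
-- what changed: B replaces A's recursion (re-slicing the string and rebuilding the result at every level) by a single left-to-right pass over the minimal balanced-count segments, keeping two accumulators: correct segments and '(' markers are appended to a prefix list, while each wrapped/flipped part is prepended to a suffix list; the answer is prefix + reversed suffix pieces.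
import Mathlib
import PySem

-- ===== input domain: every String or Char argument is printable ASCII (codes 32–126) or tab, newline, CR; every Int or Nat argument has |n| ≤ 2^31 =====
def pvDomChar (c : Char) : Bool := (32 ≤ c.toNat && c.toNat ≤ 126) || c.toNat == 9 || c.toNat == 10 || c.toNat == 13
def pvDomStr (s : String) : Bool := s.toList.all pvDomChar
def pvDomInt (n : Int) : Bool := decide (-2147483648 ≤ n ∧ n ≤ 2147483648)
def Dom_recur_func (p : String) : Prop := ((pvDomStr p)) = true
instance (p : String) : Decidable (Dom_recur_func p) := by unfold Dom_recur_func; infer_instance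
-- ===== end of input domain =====

-- B replaces A's recursive slice-and-recurse (O(n^2)) by one linear left-to-right pass over
-- minimal balanced-count segments with two output accumulators (prefix parts / wrapped suffix parts).


-- ===== PORT A =====
-- separe_p: scan indices, counting '(' into left and ')' into right; break at the first index
-- where left == right.  none = the loop ends without break (Python: UnboundLocalError).
def sepAGo (p : List Char) (left right : Int) (i : Nat) (l : List Char) :
    Option (List Char × List Char) :=
  match l with
  | [] => none
  | c :: rest =>
    let left := if c = '(' then left + 1 else left
    let right := if c = ')' then right + 1 else right
    if left = right then some (p.take (i + 1), p.drop (i + 1))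
    else sepAGo p left right (i + 1) rest

-- is_collect: stack simulation, exactly A's code.
def isCollectGo (stack : List Char) (l : List Char) : Bool :=
  match l with
  | [] => stack.isEmpty
  | c :: rest =>
    if c = '(' then isCollectGo ('(' :: stack) rest
    else if c = ')' then
      match stack with
      | [] => false
      | _ :: s => isCollectGo s rest
    else isCollectGo stack rest

-- A's flip loop over u[1:-1]: '(' becomes ')', anything else becomes '('.
def flipA (u : List Char) : List Char := u.map (fun c => if c = '(' then ')' else '(')

-- recur_func with fuel = length (each recursive call is on a strictly shorter suffix);
-- the `none` branch is Python's UnboundLocalError, excluded by Pre_.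
def recurGoA (fuel : Nat) (l : List Char) : List Char :=
  match fuel with
  | 0 => []
  | fuel + 1 =>
    if l = [] then l
    else
      match sepAGo l 0 0 0 l with
      | none => []
      | some (u, v) =>
        if isCollectGo [] u then u ++ recurGoA fuel v
        else '(' :: (recurGoA fuel v ++ ')' :: flipA ((u.drop 1).dropLast))

def recur_func (p : String) : String := String.mk (recurGoA p.data.length p.data)

-- ===== PORT B =====
-- Source B's inner while: scan one minimal segment, tracking the running balance and the
-- ok flag (set false whenever the balance dips below 0); none = IndexError (excluded by Pre_).
def scanSegB (bal : Int) (ok : Bool) (acc : List Char) (l : List Char) :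
    Option (List Char × Bool × List Char) :=
  match l with
  | [] => none
  | c :: rest =>
    let bal := if c = '(' then bal + 1 else if c = ')' then bal - 1 else bal
    let ok := if bal < 0 then false else ok
    if bal = 0 then some (acc ++ [c], ok, rest)
    else scanSegB bal ok (acc ++ [c]) rest

def flipB (u : List Char) : List Char := u.map (fun c => if c = '(' then ')' else '(')

-- Source B's outer while: one pass over the segments, appending to pre, prepending to post.
def goB (fuel : Nat) (l pre post : List Char) : List Char :=
  match fuel with
  | 0 => pre ++ post
  | fuel + 1 =>
    match l with
    | [] => pre ++ post
    | _ :: _ =>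
      match scanSegB 0 true [] l with
      | none => pre ++ post
      | some (seg, ok, rest) =>
        if ok then goB fuel rest (pre ++ seg) post
        else goB fuel rest (pre ++ ['(']) ((')' :: flipB ((seg.drop 1).dropLast)) ++ post)

def recur_func_alt (p : String) : String := String.mk (goB p.data.length p.data [] [])

-- ===== PRECONDITION & SPEC =====
-- Pre_ excludes exactly the strings with unequal counts of '(' and ')', on which A's
-- separe_p eventually finds no balanced prefix and A raises UnboundLocalError.
def Pre_recur_func (p : String) : Prop := p.data.count '(' = p.data.count ')'
instance (p : String) : Decidable (Pre_recur_func p) := by unfold Pre_recur_func; infer_instance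
def pvWitness_recur_func : String := ")(()"

def Spec_recur_func (p : String) (out : String) : Prop := out = recur_func_alt p
instance (p : String) (out : String) : Decidable (Spec_recur_func p out) := by unfold Spec_recur_func; infer_instance

-- ===== CLAIM (what is proved, stated in full; the proofs are below) =====
def Claim_equal_recur_func : Prop := ∀ (p : String), Dom_recur_func p → Pre_recur_func p → Spec_recur_func p (recur_func p)

-- ===== LEMMAS AND PROOFS =====

-- per-character balance contribution
def updC (c : Char) : Int := if c = '(' then 1 else if c = ')' then -1 else 0

theorem upd_eq (bal : Int) (c : Char) :
    (if c = '(' then bal + 1 else if c = ')' then bal - 1 else bal) = bal + updC c := by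
  unfold updC; split_ifs <;> ring

-- net balance of a list: #'(' - #')'
def netBal (l : List Char) : Int :=
  match l with
  | [] => 0
  | c :: rest => updC c + netBal rest

theorem netBal_append (a b : List Char) : netBal (a ++ b) = netBal a + netBal b := by
  induction a with
  | nil => simp [netBal]
  | cons c r ih => simp [netBal, ih]; ring

theorem updC_lparen : updC '(' = 1 := by decide
theorem updC_rparen : updC ')' = -1 := by decide
theorem updC_other {c : Char} (h1 : c ≠ '(') (h2 : c ≠ ')') : updC c = 0 := by
  simp [updC, h1, h2]

theorem netBal_count (l : List Char) : netBal l = (l.count '(' : Int) - (l.count ')' : Int) := by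
  induction l with
  | nil => simp [netBal]
  | cons c r ih =>
    rw [show netBal (c :: r) = updC c + netBal r from rfl, ih]
    by_cases h1 : c = '('
    · subst h1
      simp [updC_lparen, List.count_cons]
      push_cast
      ring
    · by_cases h2 : c = ')'
      · subst h2
        simp [updC_rparen, List.count_cons, (by decide : ¬ ((')' : Char) = '('))]
        push_cast
        ring
      · simp [updC_other h1 h2, List.count_cons, h1, h2,
          (show ¬ (c == '(') = true by simp [h1]), (show ¬ (c == ')') = true by simp [h2])]

-- chkI bal l = the running balance (starting at bal) never dips below 0 along l
def chkI (bal : Int) (l : List Char) : Bool :=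
  match l with
  | [] => true
  | c :: rest =>
    let bal := if c = '(' then bal + 1 else if c = ')' then bal - 1 else bal
    (decide (0 ≤ bal)) && chkI bal rest

theorem chkI_cons (bal : Int) (c : Char) (rest : List Char) :
    chkI bal (c :: rest) = ((decide (0 ≤ bal + updC c)) && chkI (bal + updC c) rest) := by
  simp only [chkI]; rw [upd_eq]

-- isCollectGo only looks at the stack's length
def chk2 (n : Nat) (l : List Char) : Bool :=
  match l with
  | [] => n == 0
  | c :: rest =>
    if c = '(' then chk2 (n + 1) rest
    else if c = ')' then
      match n with
      | 0 => false
      | m + 1 => chk2 m rest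
    else chk2 n rest

theorem isCollect_chk2 (l : List Char) : ∀ (s : List Char), isCollectGo s l = chk2 s.length l := by
  induction l with
  | nil => intro s; cases s <;> simp [isCollectGo, chk2, List.isEmpty]
  | cons c rest ih =>
    intro s
    by_cases h1 : c = '('
    · subst h1; simp only [isCollectGo, chk2, if_pos rfl]
      cases s <;> simp [ih]
    · by_cases h2 : c = ')'
      · subst h2
        simp only [isCollectGo, chk2, if_neg h1, if_pos rfl]
        cases s with
        | nil => simp
        | cons a s => simp [ih]
      · simp only [isCollectGo, chk2, if_neg h1, if_neg h2]
        exact ih s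

theorem chk2_chkI (l : List Char) : ∀ (n : Nat),
    chk2 n l = (chkI (n : Int) l && ((n : Int) + netBal l == 0)) := by
  induction l with
  | nil => intro n; simp [chk2, chkI, netBal]
  | cons c rest ih =>
    intro n
    rw [show netBal (c :: rest) = updC c + netBal rest from rfl, chkI_cons]
    by_cases h1 : c = '('
    · subst h1
      rw [show chk2 n ('(' :: rest) = chk2 (n + 1) rest from by simp [chk2],
        updC_lparen, ih (n + 1)]
      push_cast
      rw [show (((n:Int) + (1 + netBal rest) == 0) : Bool)
          = (((n:Int) + 1 + netBal rest == 0) : Bool) from by congr 1; ring]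
      rw [show (decide (0 ≤ (n:Int) + 1)) = true from by
        simp only [decide_eq_true_eq]; omega]
      simp
    · by_cases h2 : c = ')'
      · subst h2
        cases n with
        | zero =>
          rw [show chk2 0 (')' :: rest) = false from by simp [chk2], updC_rparen]
          push_cast
          norm_num
        | succ m =>
          rw [show chk2 (m + 1) (')' :: rest) = chk2 m rest from by simp [chk2],
            updC_rparen, ih m]
          push_cast
          rw [show ((m:Int) + 1 + -1) = (m:Int) from by ring]
          rw [show (((m:Int) + 1 + (-1 + netBal rest) == 0) : Bool)
              = (((m:Int) + netBal rest == 0) : Bool) from by congr 1; ring]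
          rw [show (decide (0 ≤ (m:Int))) = true from by
            simp only [decide_eq_true_eq]; omega]
          simp
      · rw [show chk2 n (c :: rest) = chk2 n rest from by simp [chk2, h1, h2],
          updC_other h1 h2, ih n]
        rw [show ((n:Int) + 0) = (n:Int) from by ring]
        rw [show (((n:Int) + (0 + netBal rest) == 0) : Bool)
            = (((n:Int) + netBal rest == 0) : Bool) from by congr 1; ring]
        rw [show (decide (0 ≤ (n:Int))) = true from by
          simp only [decide_eq_true_eq]; omega]
        simp

-- scanSegB's structural facts
theorem scanSegB_facts (l : List Char) : ∀ (bal : Int) (ok : Bool) (acc seg rest : List Char)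
    (okOut : Bool), scanSegB bal ok acc l = some (seg, okOut, rest) →
    (∃ cons, seg = acc ++ cons ∧ l = cons ++ rest ∧ cons ≠ [] ∧
      bal + netBal cons = 0 ∧ okOut = (ok && chkI bal cons)) := by
  induction l with
  | nil => intro bal ok acc seg rest okOut h; simp [scanSegB] at h
  | cons c tl ih =>
    intro bal ok acc seg rest okOut h
    simp only [scanSegB, upd_eq] at h
    by_cases hz : bal + updC c = 0
    · rw [if_pos hz] at h
      simp only [Option.some_inj, Prod.mk.injEq] at h
      obtain ⟨h1, h2, h3⟩ := h
      refine ⟨[c], h1.symm, by simp [h3], by simp, ?_, ?_⟩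
      · simp [netBal]; omega
      · rw [← h2, chkI_cons]
        simp [chkI, hz]
    · rw [if_neg hz] at h
      obtain ⟨cons, hseg, hl, hne, hb, hok⟩ :=
        ih (bal + updC c) (if bal + updC c < 0 then false else ok) (acc ++ [c]) seg rest okOut h
      refine ⟨c :: cons, by simpa using hseg, by simp [hl], by simp, ?_, ?_⟩
      · simp only [netBal] at hb ⊢; omega
      · rw [hok, chkI_cons]
        by_cases hneg : bal + updC c < 0
        · simp [if_pos hneg, show ¬ ((0:Int) ≤ bal + updC c) by omega]
        · simp [if_neg hneg, show (0:Int) ≤ bal + updC c by omega, Bool.and_assoc]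

-- scanSegB returns some whenever the remaining balance closes
theorem scanSegB_some (l : List Char) : ∀ (bal : Int) (ok : Bool) (acc : List Char),
    bal + netBal l = 0 → l ≠ [] → ∃ out, scanSegB bal ok acc l = some out := by
  induction l with
  | nil => intro _ _ _ _ h; exact absurd rfl h
  | cons c tl ih =>
    intro bal ok acc hb _
    simp only [scanSegB, upd_eq]
    by_cases hz : bal + updC c = 0
    · exact ⟨_, by rw [if_pos hz]⟩
    · rw [if_neg hz]
      apply ih
      · simp only [netBal] at hb; omega
      · intro hnil
        subst hnil
        simp [netBal] at hb
        exact hz (by omega)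

theorem take_len_succ (acc : List Char) (c : Char) (tl : List Char) :
    (acc ++ c :: tl).take (acc.length + 1) = acc ++ [c] := by
  induction acc with
  | nil => simp
  | cons a r ih => simp [List.take, ih]

theorem drop_len_succ (acc : List Char) (c : Char) (tl : List Char) :
    (acc ++ c :: tl).drop (acc.length + 1) = tl := by
  induction acc with
  | nil => simp
  | cons a r ih => simp [List.drop, ih]

theorem updLR (left right : Int) (c : Char) :
    (if c = '(' then left + 1 else left) - (if c = ')' then right + 1 else right)
      = (left - right) + updC c := by
  unfold updC
  split_ifs with h1 h2
  · subst h1; exact absurd h2 (by decide)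
  · ring
  · ring
  · ring

-- A's separe_p agrees with B's segment scanner
theorem scan_agree (l : List Char) : ∀ (acc : List Char) (left right : Int) (ok : Bool),
    sepAGo (acc ++ l) left right acc.length l =
      (scanSegB (left - right) ok acc l).map (fun x => (x.1, x.2.2)) := by
  induction l with
  | nil => intro acc left right ok; simp [sepAGo, scanSegB]
  | cons c tl ih =>
    intro acc left right ok
    simp only [sepAGo, scanSegB, upd_eq]
    have hLR := updLR left right c
    by_cases hz : (left - right) + updC c = 0
    · rw [if_pos (by omega : (if c = '(' then left + 1 else left) = (if c = ')' then right + 1 else right)),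
        if_pos hz]
      simp [take_len_succ, drop_len_succ]
    · rw [if_neg (by omega : ¬ (if c = '(' then left + 1 else left) = (if c = ')' then right + 1 else right)),
        if_neg hz]
      have h := ih (acc ++ [c]) (if c = '(' then left + 1 else left)
        (if c = ')' then right + 1 else right) (if (left - right) + updC c < 0 then false else ok)
      rw [hLR] at h
      simpa using h

theorem flipB_eq_flipA (u : List Char) : flipB u = flipA u := rfl

theorem scanSegB_rest_lt (l : List Char) (bal : Int) (ok : Bool) (acc seg rest : List Char)
    (okOut : Bool) (h : scanSegB bal ok acc l = some (seg, okOut, rest)) :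
    rest.length < l.length := by
  obtain ⟨cons, _, hl, hne, _, _⟩ := scanSegB_facts l bal ok acc seg rest okOut h
  subst hl
  cases cons with
  | nil => exact absurd rfl hne
  | cons a b => simp

-- Main invariant: B's accumulator pass equals A's recursion, wrapped by pre/post.
theorem main_inv : ∀ (fuel : Nat) (fa : Nat) (l pre post : List Char),
    l.length ≤ fuel → l.length ≤ fa → netBal l = 0 →
    goB fuel l pre post = pre ++ recurGoA fa l ++ post := by
  intro fuel
  induction fuel with
  | zero =>
    intro fa l pre post hf _ _
    have : l = [] := by cases l <;> simp at hf ⊢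
    subst this
    cases fa <;> simp [goB, recurGoA]
  | succ fuel ih =>
    intro fa l pre post hf hfa hb
    cases l with
    | nil => cases fa <;> simp [goB, recurGoA]
    | cons c tl =>
      cases fa with
      | zero => simp at hfa
      | succ fa =>
        obtain ⟨⟨seg, okOut, rest⟩, hscan⟩ :=
          scanSegB_some (c :: tl) 0 true [] (by simp [hb]) (by simp)
        have hsep : sepAGo (c :: tl) 0 0 0 (c :: tl) =
            (scanSegB ((0:Int) - 0) true [] (c :: tl)).map (fun x => (x.1, x.2.2)) :=
          scan_agree (c :: tl) [] 0 0 true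
        rw [show ((0:Int) - 0) = 0 by ring] at hsep
        obtain ⟨cons, hseg, hl, hne, hbal, hok⟩ :=
          scanSegB_facts (c :: tl) 0 true [] seg rest okOut hscan
        simp only [List.nil_append] at hseg
        subst hseg
        -- the ok flag equals is_collect of the segment
        have hcol : isCollectGo [] seg = okOut := by
          rw [isCollect_chk2, hok]
          simp only [List.length_nil, Nat.cast_zero]
          rw [chk2_chkI]
          have h0 : netBal seg = 0 := by omega
          simp [h0]
        have hrest : netBal rest = 0 := by
          have h2 := netBal_append seg rest
          rw [← hl] at h2
          simp only [netBal] at h2 hb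
          omega
        have hlt : rest.length < (c :: tl).length :=
          scanSegB_rest_lt (c :: tl) 0 true [] seg rest okOut hscan
        have hA : recurGoA (fa + 1) (c :: tl) =
            (if isCollectGo [] seg then seg ++ recurGoA fa rest
             else '(' :: (recurGoA fa rest ++ ')' :: flipA ((seg.drop 1).dropLast))) := by
          simp only [recurGoA, hsep, hscan]
          simp
        simp only [goB, hscan]
        rw [hcol] at hA
        cases okOut with
        | true =>
          rw [if_pos rfl, hA, if_pos rfl]
          rw [ih fa rest (pre ++ seg) post (by simp at hlt hf ⊢; omega)
            (by simp at hlt hfa ⊢; omega) hrest]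
          simp
        | false =>
          rw [if_neg (by simp), hA, if_neg (by simp)]
          rw [ih fa rest (pre ++ ['(']) ((')' :: flipB ((seg.drop 1).dropLast)) ++ post)
            (by simp at hlt hf ⊢; omega) (by simp at hlt hfa ⊢; omega) hrest]
          simp [flipB_eq_flipA]

-- ===== VERDICT (by name: the statement is the Claim_ definition above) =====
theorem recur_func_spec : Claim_equal_recur_func := by
  intro p _ hpre
  unfold Spec_recur_func recur_func recur_func_alt
  have hb : netBal p.data = 0 := by
    rw [netBal_count]
    unfold Pre_recur_func at hpre
    omega
  rw [main_inv p.data.length p.data.length p.data [] [] le_rfl le_rfl hb]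
  simp
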